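-- pv_equiv track=rewrite | github.com/andrewzwicky/puzzles | FiveThirtyEightRiddler/2017-01-27/express_tetris.py | covered
-- ===== SOURCE A (Python) =====
-- def covered(grid):
--     for col in zip(*grid):
--         false_found = False
--         for row in col:
--             if row is False:
--                 false_found = True
--             if false_found and row is not False:
--                 return True
--
--     return False
-- ===== SOURCE B (Python) =====
-- def covered(grid):
--     if not grid:
--         return False
--     w = min(map(len, grid))
--     gap = [False] * w
--     for row in grid:
--         if any(g and c is not False for g, c in zip(gap, row)):
--             return True
--         gap = [g or (c is False) for g, c in zip(gap, row)]
--     return False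
-- ===== Notes on version B (the rewrite author's own statement) =====
-- stated objective: alternative
-- what changed: Replaces A's transpose-then-scan (zip(*grid), per-column stateful false_found flag) by a single row-major pass that carries one gap-flag vector for all columns and stops at the first row with a filled cell over a flagged column.
import Mathlib
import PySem

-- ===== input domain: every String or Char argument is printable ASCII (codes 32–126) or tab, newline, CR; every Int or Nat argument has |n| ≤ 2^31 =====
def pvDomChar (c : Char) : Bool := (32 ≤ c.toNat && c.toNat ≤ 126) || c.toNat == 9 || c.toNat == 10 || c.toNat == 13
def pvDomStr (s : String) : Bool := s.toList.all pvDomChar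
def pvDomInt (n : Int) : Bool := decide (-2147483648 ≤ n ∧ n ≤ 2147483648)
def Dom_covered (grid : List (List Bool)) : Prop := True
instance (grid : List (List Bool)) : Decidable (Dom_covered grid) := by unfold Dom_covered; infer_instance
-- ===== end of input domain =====

-- B replaces A's column-by-column scan (transpose + stateful flag per column) by a single
-- row-major pass that carries one gap-flag vector for all columns (objective: alternative).

-- ===== PORT A =====
-- zip(*grid): columns of the grid, truncated to the shortest row
def pvCols (grid : List (List Bool)) : List (List Bool) :=
  match grid with
  | [] => []
  | _ :: _ =>
    let m := ((grid.map List.length).min?).getD 0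
    (List.range m).map (fun j => grid.map (fun r => r.getD j false))

-- the inner `for row in col` loop carrying the false_found flag; returns True on A's early return
def pvScanA : List Bool → Bool → Bool
  | [], _ => false
  | r :: rest, ff =>
    let ff' := if r = false then true else ff
    if ff' && r then true else pvScanA rest ff'

def covered (grid : List (List Bool)) : Bool :=
  (pvCols grid).any (fun col => pvScanA col false)

-- ===== PORT B =====
-- any(g and c is not False for g, c in zip(gap, row))
def pvFound (gap row : List Bool) : Bool :=
  (List.zip gap row).any (fun p => p.1 && p.2)

-- gap = [g or (c is False) for g, c in zip(gap, row)]
def pvUpd (gap row : List Bool) : List Bool :=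
  (List.zip gap row).map (fun p => p.1 || !p.2)

-- the `for row in grid` loop with its early return
def pvLoop : List (List Bool) → List Bool → Bool
  | [], _ => false
  | r :: rest, gap => if pvFound gap r then true else pvLoop rest (pvUpd gap r)

def covered_alt (grid : List (List Bool)) : Bool :=
  match grid with
  | [] => false
  | _ :: _ =>
    let w := ((grid.map List.length).min?).getD 0
    pvLoop grid (List.replicate w false)

-- ===== PRECONDITION & SPEC =====
def Spec_covered (grid : List (List Bool)) (out : Bool) : Prop := out = covered_alt grid
instance (grid : List (List Bool)) (out : Bool) : Decidable (Spec_covered grid out) := by unfold Spec_covered; infer_instance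

-- ===== CLAIM (what is proved, stated in full; the proofs are below) =====
def Claim_equal_covered : Prop := ∀ (grid : List (List Bool)), Dom_covered grid → Spec_covered grid (covered grid)

-- ===== LEMMAS AND PROOFS =====

-- column j of a list of rows
def pvCol (rows : List (List Bool)) (j : Nat) : List Bool :=
  rows.map (fun r => r.getD j false)

-- "a False occurs strictly before a non-False": the value A's inner scan computes
def pvPat : List Bool → Bool
  | [] => false
  | true :: r => pvPat r
  | false :: r => r.contains true

theorem pvScanA_true (col : List Bool) : pvScanA col true = col.contains true := by
  induction col with
  | nil => rfl
  | cons r rest ih =>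
    cases r with
    | false =>
      rw [show pvScanA (false :: rest) true = pvScanA rest true from rfl, ih]; simp
    | true => rw [show pvScanA (true :: rest) true = true from rfl]; simp

theorem pvScanA_pat (col : List Bool) : pvScanA col false = pvPat col := by
  induction col with
  | nil => rfl
  | cons r rest ih =>
    cases r with
    | false =>
      rw [show pvScanA (false :: rest) false = pvScanA rest true from rfl, pvScanA_true]; rfl
    | true =>
      simpa [pvScanA, pvPat] using ih

theorem any_congr_mem {α : Type} (l : List α) (f g : α → Bool)
    (h : ∀ x ∈ l, f x = g x) : l.any f = l.any g := by
  induction l with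
  | nil => rfl
  | cons x xs ih =>
    simp only [List.any_cons, h x (List.mem_cons_self), ih (fun y hy => h y (List.mem_cons_of_mem _ hy))]

theorem any_eq_range {α : Type} (l : List α) (d : α) (f : α → Bool) :
    l.any f = (List.range l.length).any (fun j => f (l.getD j d)) := by
  induction l with
  | nil => rfl
  | cons x xs ih =>
    rw [List.any_cons, List.length_cons, List.range_succ_eq_map, List.any_cons, List.any_map]
    simp only [List.getD_cons_zero, Function.comp_def, List.getD_cons_succ]
    rw [ih]

-- the invariant of B's row loop: it computes, per column j < w, either
-- "column contains a non-False" (if the gap flag is already set) or pvPat of the column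
theorem pvLoop_spec (rows : List (List Bool)) (w : Nat) (gap : List Bool)
    (hg : gap.length = w) (hr : ∀ r ∈ rows, w ≤ r.length) :
    pvLoop rows gap =
      (List.range w).any (fun j =>
        if gap.getD j false then (pvCol rows j).contains true else pvPat (pvCol rows j)) := by
  induction rows generalizing gap with
  | nil =>
    show false = _
    symm
    apply List.any_eq_false.mpr
    intro j _
    cases h : gap.getD j false <;>
      simp only [Bool.false_eq_true, if_false, if_true, pvCol, List.map_nil] <;> decide
  | cons r rest ih =>
    have hwr : w ≤ r.length := hr r (List.mem_cons_self)
    have hzl : (List.zip gap r).length = w := by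
      simp [List.length_zip, hg]; omega
    have hzget : ∀ j, j < w → (List.zip gap r).getD j (false, false) =
        (gap.getD j false, r.getD j false) := by
      intro j hj
      have h1 : j < gap.length := by omega
      have h2 : j < r.length := by omega
      have h3 : j < (List.zip gap r).length := by omega
      rw [List.getD_eq_getElem _ _ h3, List.getD_eq_getElem _ _ h1, List.getD_eq_getElem _ _ h2]
      simp [List.getElem_zip]
    have hfound : pvFound gap r =
        (List.range w).any (fun j => gap.getD j false && r.getD j false) := by
      rw [pvFound, any_eq_range _ (false, false), hzl]
      exact any_congr_mem _ _ _ (fun j hj => by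
        rw [hzget j (List.mem_range.mp hj)])
    have hupdlen : (pvUpd gap r).length = w := by simp [pvUpd, hzl]
    have hupdget : ∀ j, j < w →
        (pvUpd gap r).getD j false = (gap.getD j false || !(r.getD j false)) := by
      intro j hj
      have h3 : j < (List.zip gap r).length := by omega
      have h4 : j < (pvUpd gap r).length := by omega
      rw [List.getD_eq_getElem _ _ h4]
      have := hzget j hj
      rw [List.getD_eq_getElem _ _ h3] at this
      simp only [pvUpd, List.getElem_map, this]
    rw [show pvLoop (r :: rest) gap = if pvFound gap r then true else pvLoop rest (pvUpd gap r) from rfl]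
    by_cases hf : pvFound gap r = true
    · rw [if_pos hf]
      rw [hfound] at hf
      obtain ⟨j, hjmem, hj⟩ := List.any_eq_true.mp hf
      have hjw := List.mem_range.mp hjmem
      symm
      apply List.any_eq_true.mpr
      refine ⟨j, hjmem, ?_⟩
      obtain ⟨hgj, hrj⟩ := Bool.and_eq_true_iff.mp hj
      rw [if_pos hgj, show pvCol (r :: rest) j = r.getD j false :: pvCol rest j from rfl, hrj]
      simp
    · rw [if_neg hf]
      rw [ih (pvUpd gap r) hupdlen (fun x hx => hr x (List.mem_cons_of_mem _ hx))]
      apply any_congr_mem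
      intro j hjmem
      have hjw := List.mem_range.mp hjmem
      have hnf : ¬ (gap.getD j false = true ∧ r.getD j false = true) := by
        intro ⟨h1, h2⟩
        apply hf
        rw [hfound]
        exact List.any_eq_true.mpr ⟨j, hjmem, Bool.and_eq_true_iff.mpr ⟨h1, h2⟩⟩
      rw [hupdget j hjw]
      have hcol : pvCol (r :: rest) j = r.getD j false :: pvCol rest j := rfl
      cases hgap : gap.getD j false with
      | true =>
        have hrj : r.getD j false = false := by
          cases hrow : r.getD j false
          · rfl
          · exact absurd ⟨hgap, hrow⟩ hnf
        rw [hcol, hrj]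
        simp
      | false =>
        cases hrow : r.getD j false with
        | true =>
          rw [hcol, hrow,
            show pvPat (true :: pvCol rest j) = pvPat (pvCol rest j) from rfl]
          simp
        | false =>
          rw [hcol, hrow,
            show pvPat (false :: pvCol rest j) = (pvCol rest j).contains true from rfl]
          simp

theorem getD_replicate_false (w j : Nat) : (List.replicate w false).getD j false = false := by
  rcases lt_or_ge j w with h | h
  · rw [List.getD_eq_getElem _ _ (by simpa using h)]; simp
  · rw [List.getD_eq_default _ _ (by simpa using h)]

theorem covered_eq (grid : List (List Bool)) : covered grid = covered_alt grid := by
  cases grid with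
  | nil => rfl
  | cons r rest =>
    rw [covered, covered_alt, pvCols]
    have hr : ∀ x ∈ (r :: rest), (((r :: rest).map List.length).min?).getD 0 ≤ x.length := by
      intro x hx
      cases hmo : ((r :: rest).map List.length).min? with
      | none => simp at hmo
      | some m =>
        have : m ≤ x.length :=
          (List.min?_eq_some_iff.mp hmo).2 x.length (List.mem_map_of_mem hx)
        simpa [hmo] using this
    rw [pvLoop_spec (r :: rest) _ _ (by simp) hr, List.any_map]
    apply any_congr_mem
    intro j hj
    rw [getD_replicate_false]
    simp only [Bool.false_eq_true, if_false, Function.comp_def]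
    exact pvScanA_pat _

-- ===== VERDICT (by name: the statement is the Claim_ definition above) =====
theorem covered_spec : Claim_equal_covered := by
  intro grid _
  unfold Spec_covered
  exact covered_eq grid
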